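-- pv_equiv track=rewrite | github.com/BenBrock/universal_gemm | dtensor_utils.py | _flatten_index
-- ===== SOURCE A (Python) =====
-- def _flatten_index(coords: list[int], sizes: list[int]) -> int:
--     if len(coords) != len(sizes):
--         raise ValueError(f"coords/sizes length mismatch: {len(coords)} != {len(sizes)}")
--     index = 0
--     for c, size in zip(coords, sizes):
--         if c < 0 or c >= size:
--             raise ValueError(f"coordinate {c} out of range for size {size}")
--         index = index * size + c
--     return index
-- ===== SOURCE B (Python) =====
-- def _flatten_index(coords: list[int], sizes: list[int]) -> int:
--     n = len(coords)
--     if n != len(sizes):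
--         raise ValueError(f"coords/sizes length mismatch: {n} != {len(sizes)}")
--     bad = next(((c, s) for c, s in zip(coords, sizes) if not 0 <= c < s), None)
--     if bad is not None:
--         raise ValueError(f"coordinate {bad[0]} out of range for size {bad[1]}")
--     index, stride = 0, 1
--     for c, size in zip(reversed(coords), reversed(sizes)):
--         index += c * stride
--         stride *= size
--     return index
-- ===== Notes on version B (the rewrite author's own statement) =====
-- stated objective: alternative
-- what changed: B validates all coordinates in a separate forward pass and then computes the index in a right-to-left pass with an explicit running place-value stride (sum of c*stride), instead of A's single interleaved Horner loop that validates and accumulates index = index*size + c together.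
import Mathlib
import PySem

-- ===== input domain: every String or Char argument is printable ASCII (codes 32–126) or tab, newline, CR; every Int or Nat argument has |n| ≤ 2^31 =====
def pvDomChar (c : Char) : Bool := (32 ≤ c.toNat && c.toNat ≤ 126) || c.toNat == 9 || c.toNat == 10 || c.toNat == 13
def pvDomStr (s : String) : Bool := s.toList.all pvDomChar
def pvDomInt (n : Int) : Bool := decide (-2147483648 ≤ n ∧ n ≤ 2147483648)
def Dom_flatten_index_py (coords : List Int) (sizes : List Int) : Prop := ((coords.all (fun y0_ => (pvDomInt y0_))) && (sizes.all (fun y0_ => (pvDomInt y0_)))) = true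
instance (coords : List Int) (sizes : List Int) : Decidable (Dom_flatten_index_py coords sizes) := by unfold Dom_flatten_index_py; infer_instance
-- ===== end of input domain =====

-- B: separate forward validation pass, then a right-to-left stride pass (sum of c*stride),
-- instead of A's interleaved validate+Horner loop; proved equal on Pre_ (no ValueError inputs).


-- ===== PORT A =====
-- A's loop: validates and accumulates index = index*size + c together (raise modelled as 0,
-- dead under Pre_, which excludes all raising inputs).
def pvALoop : List (Int × Int) → Int → Int
  | [], index => index
  | (c, size) :: rest, index =>
      if c < 0 ∨ c ≥ size then 0 else pvALoop rest (index * size + c)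

def flatten_index_py (coords : List Int) (sizes : List Int) : Int :=
  if coords.length ≠ sizes.length then 0
  else pvALoop (coords.zip sizes) 0

-- ===== PORT B =====
-- B first searches forward for a bad (c, size) pair (raise modelled as 0, dead under Pre_),
-- then accumulates index += c*stride, stride *= size over the reversed zip.
def pvBLoop : List (Int × Int) → Int → Int → Int
  | [], index, _ => index
  | (c, size) :: rest, index, stride => pvBLoop rest (index + c * stride) (stride * size)

def flatten_index_py_alt (coords : List Int) (sizes : List Int) : Int :=
  if coords.length ≠ sizes.length then 0
  else
    match (coords.zip sizes).find? (fun p => !(0 ≤ p.1 ∧ p.1 < p.2 : Bool)) with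
    | some _ => 0
    | none => pvBLoop (coords.reverse.zip sizes.reverse) 0 1

-- ===== PRECONDITION & SPEC =====
-- Pre_: exactly the inputs where A returns (equal lengths, every coordinate in range);
-- on the rest A raises ValueError.
def Pre_flatten_index_py (coords : List Int) (sizes : List Int) : Prop :=
  coords.length = sizes.length ∧ ∀ p ∈ coords.zip sizes, 0 ≤ p.1 ∧ p.1 < p.2
instance (coords : List Int) (sizes : List Int) : Decidable (Pre_flatten_index_py coords sizes) := by unfold Pre_flatten_index_py; infer_instance

def pvWitness_flatten_index_py : List Int × List Int := ([1, 2, 0], [3, 4, 5])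

def Spec_flatten_index_py (coords : List Int) (sizes : List Int) (out : Int) : Prop := out = flatten_index_py_alt coords sizes
instance (coords : List Int) (sizes : List Int) (out : Int) : Decidable (Spec_flatten_index_py coords sizes out) := by unfold Spec_flatten_index_py; infer_instance

-- ===== CLAIM (what is proved, stated in full; the proofs are below) =====
def Claim_equal_flatten_index_py : Prop := ∀ (coords : List Int) (sizes : List Int), Dom_flatten_index_py coords sizes → Pre_flatten_index_py coords sizes → Spec_flatten_index_py coords sizes (flatten_index_py coords sizes)

-- ===== LEMMAS AND PROOFS =====

-- Valid pairs: the forward search finds nothing.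
theorem pvFind_of_valid (l : List (Int × Int)) (h : ∀ p ∈ l, 0 ≤ p.1 ∧ p.1 < p.2) :
    l.find? (fun p => !(0 ≤ p.1 ∧ p.1 < p.2 : Bool)) = none := by
  rw [List.find?_eq_none]
  intro p hp
  simpa using h p hp

-- A's Horner loop splits its accumulator linearly over the product of the sizes.
theorem pvALoop_acc (l : List (Int × Int)) (h : ∀ p ∈ l, 0 ≤ p.1 ∧ p.1 < p.2) (idx : Int) :
    pvALoop l idx = idx * (l.map Prod.snd).prod + pvALoop l 0 := by
  induction l generalizing idx with
  | nil => simp [pvALoop]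
  | cons hd tl ih =>
      obtain ⟨c, s⟩ := hd
      have hc := h (c, s) (List.mem_cons_self ..)
      have ht : ∀ p ∈ tl, 0 ≤ p.1 ∧ p.1 < p.2 := fun p hp => h p (List.mem_cons_of_mem _ hp)
      simp only [pvALoop]
      rw [if_neg (by push Not; omega), if_neg (by push Not; omega)]
      rw [ih ht (idx * s + c), ih ht (0 * s + c)]
      simp only [List.map_cons, List.prod_cons]
      ring

-- B's loop is tail-recursive; processing an appended tail continues from the folded state.
theorem pvBLoop_append (xs ys : List (Int × Int)) (idx stride : Int) :
    pvBLoop (xs ++ ys) idx stride =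
      pvBLoop ys (pvBLoop xs idx stride) (stride * (xs.map Prod.snd).prod) := by
  induction xs generalizing idx stride with
  | nil => simp [pvBLoop]
  | cons hd tl ih =>
      obtain ⟨c, s⟩ := hd
      simp only [List.cons_append, pvBLoop, ih, List.map_cons, List.prod_cons]
      ring_nf

-- B's right-to-left stride pass computes A's Horner value.
theorem pvBLoop_eq_pvALoop (l : List (Int × Int)) (h : ∀ p ∈ l, 0 ≤ p.1 ∧ p.1 < p.2)
    (idx stride : Int) :
    pvBLoop l.reverse idx stride = idx + stride * pvALoop l 0 := by
  induction l generalizing idx stride with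
  | nil => simp [pvBLoop, pvALoop]
  | cons hd tl ih =>
      obtain ⟨c, s⟩ := hd
      have hc := h (c, s) (List.mem_cons_self ..)
      have ht : ∀ p ∈ tl, 0 ≤ p.1 ∧ p.1 < p.2 := fun p hp => h p (List.mem_cons_of_mem _ hp)
      rw [List.reverse_cons, pvBLoop_append, ih ht]
      simp only [pvBLoop]
      have : pvALoop ((c, s) :: tl) 0 = c * (tl.map Prod.snd).prod + pvALoop tl 0 := by
        simp only [pvALoop]
        rw [if_neg (by push Not; omega), pvALoop_acc tl ht]
        ring
      rw [this]
      simp only [List.map_reverse, List.prod_reverse]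
      ring

-- With equal lengths, zipping the reverses is reversing the zip.
theorem pvZip_reverse (coords sizes : List Int) (h : coords.length = sizes.length) :
    coords.reverse.zip sizes.reverse = (coords.zip sizes).reverse := by
  induction coords generalizing sizes with
  | nil => cases sizes with
      | nil => rfl
      | cons b bs => simp at h
  | cons a as ih =>
      cases sizes with
      | nil => simp at h
      | cons b bs =>
          simp only [List.length_cons, Nat.add_right_cancel_iff] at h
          simp only [List.reverse_cons, List.zip_cons_cons]
          rw [List.zip_append (by simp [h]), ih bs h]
          rfl

-- ===== VERDICT (by name: the statement is the Claim_ definition above) =====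
theorem flatten_index_py_spec : Claim_equal_flatten_index_py := by
  intro coords sizes _ hpre
  obtain ⟨hlen, hval⟩ := hpre
  unfold Spec_flatten_index_py flatten_index_py flatten_index_py_alt
  rw [if_neg (by omega), if_neg (by omega), pvFind_of_valid _ hval,
      pvZip_reverse coords sizes hlen,
      pvBLoop_eq_pvALoop _ hval]
  ring
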